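-- pv_equiv track=rewrite | github.com/menybenatar/algorithms_tirgulim | tirgul 7/main.py | gemeRec
-- ===== SOURCE A (Python) =====
-- def gemeRec(a,i,j):
--     if i>j:
--         return 0
--     if i ==j :
--         return a[i]
--     if i+1 ==j :
--         return max(a[i],a[j])
--
--     res1 = a[i] + min (gemeRec(a,i+2,j) ,gemeRec(a,i+1,j-1))
--     res2 = a[j] + min (gemeRec(a,i+1,j-1) ,gemeRec(a,i,j-2))
--     return max(res1,res2)
-- ===== SOURCE B (Python) =====
-- def gemeRec(a, i, j):
--     if i > j:
--         return 0
--     vals = [a[k] for k in range(i, j + 1)]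
--     n = len(vals)
--     prevprev = vals[:]                  # layer d = 0: single coins
--     if n == 1:
--         return prevprev[0]
--     prev = [max(vals[k], vals[k + 1]) for k in range(n - 1)]   # layer d = 1
--     for d in range(2, n):
--         cur = [max(vals[k] + min(prevprev[k + 2], prevprev[k + 1]),
--                    vals[k + d] + min(prevprev[k + 1], prevprev[k]))
--                for k in range(n - d)]
--         prevprev, prev = prev, cur
--     return prev[0]
-- ===== Notes on version B (the rewrite author's own statement) =====
-- stated objective: alternative
-- what changed: Replaced the three-way minimax recursion by a bottom-up interval DP that builds layers of subinterval game values (keeping only the two previous layers) and reads the answer from the top layer.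
import Mathlib
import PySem

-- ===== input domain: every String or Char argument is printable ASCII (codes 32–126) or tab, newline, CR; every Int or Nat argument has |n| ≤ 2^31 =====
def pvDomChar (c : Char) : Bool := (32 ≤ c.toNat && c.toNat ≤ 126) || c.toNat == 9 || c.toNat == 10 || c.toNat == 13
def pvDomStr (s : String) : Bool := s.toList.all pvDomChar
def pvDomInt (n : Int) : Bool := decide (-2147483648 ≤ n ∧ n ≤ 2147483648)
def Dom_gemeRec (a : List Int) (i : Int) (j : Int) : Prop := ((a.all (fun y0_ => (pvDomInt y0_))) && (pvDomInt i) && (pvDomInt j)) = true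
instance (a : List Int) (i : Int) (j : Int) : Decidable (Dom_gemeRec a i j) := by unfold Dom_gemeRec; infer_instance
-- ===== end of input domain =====

-- B replaces A's three-way minimax recursion by a bottom-up interval DP
-- (layers of subinterval game values, keeping only the two previous layers).

-- ===== PORT A =====
-- a[k] with Python semantics (negative indices wrap); Pre_ keeps every accessed
-- index in range, so the `.getD 0` default is never observable inside Pre_.
def pyAt (a : List Int) (k : Int) : Int := (PySem.List.pyGet? a k).getD 0

def gemeRec (a : List Int) (i : Int) (j : Int) : Int :=
  if i > j then 0
  else if i = j then pyAt a i
  else if i + 1 = j then max (pyAt a i) (pyAt a j)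
  else
    let res1 := pyAt a i + min (gemeRec a (i + 2) j) (gemeRec a (i + 1) (j - 1))
    let res2 := pyAt a j + min (gemeRec a (i + 1) (j - 1)) (gemeRec a (i) (j - 2))
    max res1 res2
termination_by (j - i).toNat
decreasing_by all_goals omega

-- ===== PORT B =====
-- vals = [a[k] for k in range(i, j+1)]
def pvWindow (a : List Int) (i : Int) (n : Nat) : List Int :=
  (List.range n).map (fun (k : Nat) => pyAt a (i + (k : Int)))

-- one DP layer: entry k is the value of the subinterval [k, k+d], built from layer d-2
def altStep (vals : List Int) (d : Nat) (pp : List Int) : List Int :=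
  (List.range (vals.length - d)).map (fun k =>
    max (vals.getD k 0 + min (pp.getD (k + 2) 0) (pp.getD (k + 1) 0))
        (vals.getD (k + d) 0 + min (pp.getD (k + 1) 0) (pp.getD k 0)))

-- the `for d in range(2, n)` loop of Source B, carrying (prevprev, prev)
def altLoop (vals : List Int) (d : Nat) (fuel : Nat) (pp prev : List Int) : Int :=
  match fuel with
  | 0 => prev.getD 0 0
  | fuel + 1 => altLoop vals (d + 1) fuel prev (altStep vals d pp)

def gemeRec_alt (a : List Int) (i : Int) (j : Int) : Int :=
  if i > j then 0
  else
    let vals := pvWindow a i (j - i + 1).toNat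
    let n := vals.length
    if n = 1 then vals.getD 0 0
    else
      let r1 := (List.range (n - 1)).map (fun k => max (vals.getD k 0) (vals.getD (k + 1) 0))
      altLoop vals 2 (n - 2) vals r1

-- ===== PRECONDITION & SPEC =====
-- Pre_ excludes exactly the inputs on which Python A raises IndexError: i ≤ j with
-- some index of [i, j] outside [-len(a), len(a)).
def Pre_gemeRec (a : List Int) (i : Int) (j : Int) : Prop :=
  i > j ∨ (-(a.length : Int) ≤ i ∧ i ≤ j ∧ j < (a.length : Int))
instance (a : List Int) (i : Int) (j : Int) : Decidable (Pre_gemeRec a i j) := by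
  unfold Pre_gemeRec; infer_instance

def pvWitness_gemeRec : List Int × Int × Int := ([3, 9, 1, 2], 0, 3)

def Spec_gemeRec (a : List Int) (i : Int) (j : Int) (out : Int) : Prop := out = gemeRec_alt a i j
instance (a : List Int) (i : Int) (j : Int) (out : Int) : Decidable (Spec_gemeRec a i j out) := by
  unfold Spec_gemeRec; infer_instance

-- ===== CLAIM (what is proved, stated in full; the proofs are below) =====
def Claim_equal_gemeRec : Prop := ∀ (a : List Int) (i : Int) (j : Int), Dom_gemeRec a i j → Pre_gemeRec a i j → Spec_gemeRec a i j (gemeRec a i j)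

-- ===== LEMMAS AND PROOFS =====

-- mathematical layer value: Gfun vals d k = game value of subinterval [k, k+d] of vals
def Gfun (vals : List Int) : Nat → Nat → Int
  | 0, k => vals.getD k 0
  | 1, k => max (vals.getD k 0) (vals.getD (k + 1) 0)
  | (d + 2), k =>
      max (vals.getD k 0 + min (Gfun vals d (k + 2)) (Gfun vals d (k + 1)))
          (vals.getD (k + d + 2) 0 + min (Gfun vals d (k + 1)) (Gfun vals d k))

def layerList (vals : List Int) (d : Nat) : List Int :=
  (List.range (vals.length - d)).map (Gfun vals d)

theorem layerList_getD (vals : List Int) (d k : Nat) (hk : k < vals.length - d) :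
    (layerList vals d).getD k 0 = Gfun vals d k := by
  unfold layerList
  rw [List.getD_eq_getElem _ _ (by simpa using hk)]
  simp

theorem altStep_layer (vals : List Int) (d : Nat) (hd : d + 2 ≤ vals.length) :
    altStep vals (d + 2) (layerList vals d) = layerList vals (d + 2) := by
  unfold altStep
  conv_rhs => rw [layerList]
  apply List.ext_getElem (by simp)
  intro k h1 h2
  have hk : k < vals.length - (d + 2) := by simpa using h1
  simp only [List.getElem_map, List.getElem_range]
  rw [Gfun, layerList_getD vals d (k + 2) (by omega), layerList_getD vals d (k + 1) (by omega),
      layerList_getD vals d k (by omega), show k + (d + 2) = k + d + 2 by omega]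

theorem altLoop_layer (vals : List Int) (fuel : Nat) :
    ∀ d, 2 ≤ d → d + fuel ≤ vals.length →
    altLoop vals d fuel (layerList vals (d - 2)) (layerList vals (d - 1)) =
      (layerList vals (d - 1 + fuel)).getD 0 0 := by
  induction fuel with
  | zero => intro d _ _; simp [altLoop]
  | succ f ih =>
    intro d hd hle
    have hstep : altStep vals d (layerList vals (d - 2)) = layerList vals d := by
      have := altStep_layer vals (d - 2) (by omega)
      rwa [show d - 2 + 2 = d by omega] at this
    rw [altLoop, hstep]
    have h := ih (d + 1) (by omega) (by omega)
    rw [show d + 1 - 2 = d - 1 by omega, show d + 1 - 1 = d by omega] at h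
    rw [h, show d + f = d - 1 + (f + 1) by omega]

theorem window_getD (a : List Int) (i : Int) (n : Nat) (k : Nat) (hk : k < n) :
    (pvWindow a i n).getD k 0 = pyAt a (i + (k : Int)) := by
  unfold pvWindow
  rw [List.getD_eq_getElem _ _ (by simpa using hk)]
  simp

theorem window_length (a : List Int) (i : Int) (n : Nat) : (pvWindow a i n).length = n := by
  simp [pvWindow]

-- B's body after window extraction equals the top layer value
theorem alt_body_eq (vals : List Int) (h : 1 ≤ vals.length) :
    (if vals.length = 1 then vals.getD 0 0
     else altLoop vals 2 (vals.length - 2) vals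
       ((List.range (vals.length - 1)).map (fun k => max (vals.getD k 0) (vals.getD (k + 1) 0))))
    = Gfun vals (vals.length - 1) 0 := by
  by_cases h1 : vals.length = 1
  · rw [if_pos h1, h1, Gfun]
  · rw [if_neg h1]
    have hn2 : 2 ≤ vals.length := by omega
    have hv0 : layerList vals 0 = vals := by
      unfold layerList
      rw [Nat.sub_zero]
      apply List.ext_getElem (by simp)
      intro k hk _
      simp only [List.getElem_map, List.getElem_range] at *
      rw [Gfun, List.getD_eq_getElem _ _ (by simpa using hk)]
    have hr1 : layerList vals 1 =
        (List.range (vals.length - 1)).map (fun k => max (vals.getD k 0) (vals.getD (k + 1) 0)) := by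
      unfold layerList
      apply List.ext_getElem (by simp)
      intro k hk _
      simp only [List.getElem_map, List.getElem_range]
      rw [Gfun]
    have hloop := altLoop_layer vals (vals.length - 2) 2 (by omega) (by omega)
    rw [show (2 : Nat) - 2 = 0 by omega, show (2 : Nat) - 1 = 1 by omega,
        show 1 + (vals.length - 2) = vals.length - 1 by omega, hv0, hr1] at hloop
    rw [hloop]
    rw [layerList_getD vals (vals.length - 1) 0 (by omega)]

-- A's recursion computes the layer values of the extracted window
theorem gemeRec_eq_Gfun (a : List Int) (i j : Int) (n : Nat)
    (hn : n = (j - i + 1).toNat) (hij : i ≤ j) :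
    ∀ (d : Nat) (p q : Int), p ≤ q → i ≤ p → q ≤ j → (q - p).toNat = d →
      gemeRec a p q = Gfun (pvWindow a i n) d (p - i).toNat := by
  intro d
  induction d using Nat.strong_induction_on with
  | _ d ih =>
    intro p q hpq hip hqj hd
    have hip' : i + (((p - i).toNat : Nat) : Int) = p := by omega
    rcases Nat.lt_or_ge d 2 with hsmall | hbig
    · interval_cases d
      · have hpq' : p = q := by omega
        rw [gemeRec, if_neg (by omega), if_pos hpq', Gfun,
            window_getD a i n _ (by omega), hip']
      · have hpq' : p + 1 = q := by omega
        rw [gemeRec, if_neg (by omega), if_neg (by omega), if_pos hpq', Gfun,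
            window_getD a i n _ (by omega), window_getD a i n _ (by omega), hip',
            show i + ((((p - i).toNat + 1 : Nat)) : Int) = q by omega]
    · obtain ⟨e, he⟩ : ∃ e, d = e + 2 := ⟨d - 2, by omega⟩
      subst he
      rw [gemeRec, if_neg (by omega), if_neg (by omega), if_neg (by omega)]
      have h1 := ih e (by omega) (p + 2) q (by omega) (by omega) (by omega) (by omega)
      have h2 := ih e (by omega) (p + 1) (q - 1) (by omega) (by omega) (by omega) (by omega)
      have h3 := ih e (by omega) p (q - 2) (by omega) (by omega) (by omega) (by omega)
      simp only [h1, h2, h3]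
      rw [Gfun, window_getD a i n ((p - i).toNat) (by omega),
          window_getD a i n ((p - i).toNat + e + 2) (by omega), hip']
      rw [show (p + 2 - i).toNat = (p - i).toNat + 2 by omega,
          show (p + 1 - i).toNat = (p - i).toNat + 1 by omega,
          show i + ((((p - i).toNat + e + 2 : Nat)) : Int) = q by omega]

-- ===== VERDICT (by name: the statement is the Claim_ definition above) =====
theorem gemeRec_spec : Claim_equal_gemeRec := by
  intro a i j _ hpre
  unfold Spec_gemeRec gemeRec_alt
  rcases hpre with hgt | ⟨hlo, hij, hhi⟩
  · rw [if_pos hgt, gemeRec, if_pos hgt]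
  · rw [if_neg (by omega)]
    simp only [window_length]
    have hn1 : 1 ≤ (j - i + 1).toNat := by omega
    have hb := alt_body_eq (pvWindow a i (j - i + 1).toNat)
      (by rw [window_length]; omega)
    rw [window_length] at hb
    rw [hb]
    have hA := gemeRec_eq_Gfun a i j (j - i + 1).toNat rfl hij
      (j - i).toNat i j hij le_rfl le_rfl rfl
    rw [show (i - i).toNat = 0 by omega] at hA
    rw [show (j - i + 1).toNat - 1 = (j - i).toNat by omega]
    exact hA
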